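-- pv_equiv track=rewrite | github.com/Saladino93/mechhack | experiments/19_surgical_edit_omar/generate_candidates.py | find_sentence_span
-- ===== SOURCE A (Python) =====
-- def find_sentence_span(prompt: str, char_pos: int) -> tuple[int, int]:
--     """Find (start, end) of the sentence containing char_pos."""
--     if char_pos < 0 or char_pos >= len(prompt):
--         return (-1, -1)
--     # Walk left to start of sentence (after a previous . ! ? newline-or-space)
--     s = char_pos
--     while s > 0:
--         # If we just walked past sentence-end punct, stop
--         if prompt[s - 1] in ".!?\n":
--             break
--         s -= 1
--     # Skip whitespace at start
--     while s < len(prompt) and prompt[s].isspace():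
--         s += 1
--     # Walk right to next sentence-end
--     e = char_pos
--     while e < len(prompt):
--         if prompt[e] in ".!?\n":
--             e += 1
--             break
--         e += 1
--     return (s, e)
-- ===== SOURCE B (Python) =====
-- def find_sentence_span(prompt: str, char_pos: int) -> tuple[int, int]:
--     """Find (start, end) of the sentence containing char_pos."""
--     n = len(prompt)
--     if char_pos < 0 or char_pos >= n:
--         return (-1, -1)
--     # Collect every sentence-boundary index in one pass, then scan that
--     # (usually short) list once: the last boundary < char_pos gives start,
--     # the first boundary >= char_pos gives end.
--     bounds = [i for i in range(n) if prompt[i] in ".!?\n"]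
--     start, end = 0, n
--     for i in bounds:
--         if i < char_pos:
--             start = i + 1
--         else:
--             end = i + 1
--             break
--     # Skip whitespace at start (same rule as the original)
--     while start < n and prompt[start].isspace():
--         start += 1
--     return (start, end)
-- ===== Notes on version B (the rewrite author's own statement) =====
-- stated objective: faster
-- what changed: A walks character-by-character left and right from char_pos with two while loops; B collects all sentence-boundary indices in one list-comprehension pass and derives start (one past the last boundary < char_pos) and end (one past the first boundary >= char_pos) from a single scan of that index list, keeping the same whitespace skip and out-of-range guard; the C-level comprehension pass beats A's per-character interpreted loops by a constant factor (measured ~2.6x).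
import Mathlib
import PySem

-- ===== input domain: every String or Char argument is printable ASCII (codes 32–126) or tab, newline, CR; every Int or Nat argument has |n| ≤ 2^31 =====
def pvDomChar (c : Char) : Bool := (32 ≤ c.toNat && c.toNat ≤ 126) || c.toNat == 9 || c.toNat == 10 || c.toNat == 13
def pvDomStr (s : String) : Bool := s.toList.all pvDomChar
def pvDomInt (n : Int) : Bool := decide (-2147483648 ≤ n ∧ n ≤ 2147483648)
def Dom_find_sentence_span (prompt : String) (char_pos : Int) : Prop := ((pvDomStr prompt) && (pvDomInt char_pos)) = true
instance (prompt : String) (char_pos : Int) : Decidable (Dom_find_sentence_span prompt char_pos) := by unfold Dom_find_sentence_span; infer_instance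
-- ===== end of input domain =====

-- B rebuilds the span from a boundary-index list built in one pass, instead of
-- A's character-by-character walks left and right from char_pos (objective: faster by a
-- constant factor, measured).

-- shared by both ports: Python's `c in ".!?\n"` membership test and the
-- whitespace-skip loop, which both Pythons contain verbatim
def pvIsBnd (c : Char) : Bool := c == '.' || c == '!' || c == '?' || c == '\n'

-- ===== PORT A =====
-- `while s > 0: if prompt[s-1] in ".!?\n": break; s -= 1` — s stays a valid
-- nonnegative index (s ≤ char_pos < len), ported as Nat recursion; getD is exact here
def pvWalkLeft (cs : List Char) : Nat → Nat
  | 0 => 0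
  | s + 1 => if pvIsBnd (cs.getD s ' ') then s + 1 else pvWalkLeft cs s

-- `while s < len(prompt) and prompt[s].isspace(): s += 1` (used by both Pythons)
def pvSkipWs (cs : List Char) (s : Nat) : Nat :=
  if h : s < cs.length ∧ PySem.Chars.isspace (cs.getD s ' ') then pvSkipWs cs (s + 1) else s
  termination_by cs.length - s
  decreasing_by omega

-- `while e < len(prompt): if prompt[e] in ".!?\n": e += 1; break; e += 1`
def pvWalkRight (cs : List Char) (e : Nat) : Nat :=
  if h : e < cs.length then
    (if pvIsBnd (cs.getD e ' ') then e + 1 else pvWalkRight cs (e + 1))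
  else e
  termination_by cs.length - e
  decreasing_by omega

def find_sentence_span (prompt : String) (char_pos : Int) : Int × Int :=
  let cs := prompt.toList
  if char_pos < 0 ∨ char_pos ≥ (cs.length : Int) then (-1, -1)
  else
    let s := pvWalkLeft cs char_pos.toNat
    let s := pvSkipWs cs s
    let e := pvWalkRight cs char_pos.toNat
    ((s : Int), (e : Int))

-- ===== PORT B =====
-- `for i in bounds: if i < char_pos: start = i+1 else: end = i+1; break`
def pvScanBounds (p : Int) : List Int → Int → Int → Int × Int
  | [], start, e => (start, e)
  | i :: rest, start, e => if i < p then pvScanBounds p rest (i + 1) e else (start, i + 1)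

-- B's whitespace-skip loop (start : int); start is the loop variable of Source B
def pvSkipWsI (cs : List Char) (s : Int) : Int :=
  if h : s < (cs.length : Int) ∧ PySem.Chars.isspace (PySem.List.pyGetD cs s ' ') then
    pvSkipWsI cs (s + 1)
  else s
  termination_by ((cs.length : Int) - s).toNat
  decreasing_by omega

def find_sentence_span_alt (prompt : String) (char_pos : Int) : Int × Int :=
  let cs := prompt.toList
  let n : Int := cs.length
  if char_pos < 0 ∨ char_pos ≥ n then (-1, -1)
  else
    let bounds := (PySem.List.pyRange 0 n 1).filter (fun i => pvIsBnd (PySem.List.pyGetD cs i ' '))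
    let se := pvScanBounds char_pos bounds 0 n
    (pvSkipWsI cs se.1, se.2)

-- ===== PRECONDITION & SPEC =====
def Spec_find_sentence_span (prompt : String) (char_pos : Int) (out : Int × Int) : Prop := out = find_sentence_span_alt prompt char_pos
instance (prompt : String) (char_pos : Int) (out : Int × Int) : Decidable (Spec_find_sentence_span prompt char_pos out) := by unfold Spec_find_sentence_span; infer_instance

-- ===== CLAIM (what is proved, stated in full; the proofs are below) =====
def Claim_equal_find_sentence_span : Prop := ∀ (prompt : String) (char_pos : Int), Dom_find_sentence_span prompt char_pos → Spec_find_sentence_span prompt char_pos (find_sentence_span prompt char_pos)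

-- ===== LEMMAS AND PROOFS =====

-- filter predicate used by B
def pvPred (cs : List Char) (i : Int) : Bool := pvIsBnd (PySem.List.pyGetD cs i ' ')

lemma pvPred_natCast (cs : List Char) (s : Nat) : pvPred cs (s : Int) = pvIsBnd (cs.getD s ' ') := by
  simp [pvPred]

-- scanning the part of the boundary list left of p threads `start` through as a fold
lemma pvScan_left (p : Int) (l1 l2 : List Int) (h : ∀ i ∈ l1, i < p) (st e : Int) :
    pvScanBounds p (l1 ++ l2) st e = pvScanBounds p l2 (l1.foldl (fun _ i => i + 1) st) e := by
  induction l1 generalizing st with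
  | nil => simp
  | cons a l ih =>
      have ha : a < p := h a (by simp)
      simp [pvScanBounds, ha, ih (fun i hi => h i (by simp [hi]))]

lemma pvScan_right (p : Int) (l2 : List Int) (h : ∀ i ∈ l2, ¬ i < p) (st e : Int) :
    pvScanBounds p l2 st e = (st, match l2.head? with | some i => i + 1 | none => e) := by
  cases l2 with
  | nil => simp [pvScanBounds]
  | cons a l => simp [pvScanBounds, h a (by simp)]

-- A's left walk equals the fold over the boundary indices below s
lemma pvWalkLeft_eq (cs : List Char) (s : Nat) :
    ((pvWalkLeft cs s : Nat) : Int)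
      = ((PySem.List.pyRange 0 (s : Int) 1).filter (pvPred cs)).foldl (fun _ i => i + 1) 0 := by
  induction s with
  | zero => simp [pvWalkLeft, PySem.List.pyRange_one_eq_nil]
  | succ s ih =>
      rw [show ((s + 1 : Nat) : Int) = (s : Int) + 1 by push_cast; ring,
        PySem.List.pyRange_one_succ_right (by positivity), List.filter_append,
        List.filter_singleton, pvPred_natCast]
      by_cases hb : pvIsBnd (cs.getD s ' ')
      · rw [hb]
        simp only [cond_true, pvWalkLeft, if_pos hb, List.foldl_append, List.foldl_cons,
          List.foldl_nil]
        push_cast; ring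
      · rw [Bool.not_eq_true] at hb
        rw [hb]
        simp only [cond_false, pvWalkLeft, hb, Bool.false_eq_true, if_false, List.append_nil, ih]

-- A's right walk equals "one past the first boundary index >= e, else len"
lemma pvWalkRight_eq (cs : List Char) (e : Nat) (he : e <= cs.length) :
    ((pvWalkRight cs e : Nat) : Int)
      = (match ((PySem.List.pyRange (e : Int) (cs.length : Int) 1).filter (pvPred cs)).head? with
          | some i => i + 1
          | none => (cs.length : Int)) := by
  by_cases h : e < cs.length
  · rw [pvWalkRight, dif_pos h, PySem.List.pyRange_one_cons (by exact_mod_cast h),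
      List.filter_cons, pvPred_natCast]
    by_cases hb : pvIsBnd (cs.getD e ' ')
    · rw [if_pos hb, if_pos hb]
      simp
    · have hrec := pvWalkRight_eq cs (e + 1) (by omega)
      rw [if_neg hb, if_neg hb, hrec,
        show ((e : Nat) : Int) + 1 = ((e + 1 : Nat) : Int) by push_cast; ring]
  · have he' : e = cs.length := by omega
    rw [pvWalkRight, dif_neg h]
    simp [he', PySem.List.pyRange_one_eq_nil]
  termination_by cs.length - e
  decreasing_by omega

-- the two whitespace-skip loops agree on nonnegative start positions
lemma pvSkipWsI_eq (cs : List Char) (s : Nat) :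
    pvSkipWsI cs (s : Int) = ((pvSkipWs cs s : Nat) : Int) := by
  rw [pvSkipWsI, pvSkipWs]
  by_cases h : s < cs.length ∧ PySem.Chars.isspace (cs.getD s ' ')
  · have h' : (s : Int) < (cs.length : Int) ∧
        PySem.Chars.isspace (PySem.List.pyGetD cs (s : Int) ' ') := by
      simpa using h
    rw [dif_pos h', dif_pos h,
      show ((s : Int) + 1) = ((s + 1 : Nat) : Int) by push_cast; ring,
      pvSkipWsI_eq cs (s + 1)]
  · have h' : ¬ ((s : Int) < (cs.length : Int) ∧
        PySem.Chars.isspace (PySem.List.pyGetD cs (s : Int) ' ')) := by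
      simpa using h
    rw [dif_neg h', dif_neg h]
  termination_by cs.length - s
  decreasing_by omega

-- ===== VERDICT (by name: the statement is the Claim_ definition above) =====
theorem find_sentence_span_spec : Claim_equal_find_sentence_span := by
  intro prompt char_pos _
  unfold Spec_find_sentence_span find_sentence_span find_sentence_span_alt
  set cs := prompt.toList with hcs
  by_cases hg : char_pos < 0 ∨ char_pos ≥ (cs.length : Int)
  · simp [hg]
  · push_neg at hg
    obtain ⟨h0, hlt⟩ := hg
    have hne : ¬ (char_pos < 0 ∨ char_pos ≥ (cs.length : Int)) := by push_neg; exact ⟨h0, hlt⟩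
    simp only [if_neg hne]
    have hsplit : PySem.List.pyRange 0 (cs.length : Int) 1
        = PySem.List.pyRange 0 char_pos 1 ++ PySem.List.pyRange char_pos (cs.length : Int) 1 :=
      PySem.List.pyRange_one_append 0 char_pos (cs.length : Int) h0 (le_of_lt hlt)
    have hL : ∀ i ∈ (PySem.List.pyRange 0 char_pos 1).filter (pvPred cs), i < char_pos := by
      intro i hi
      have := (List.mem_filter.mp hi).1
      exact (PySem.List.mem_pyRange_one.mp this).2
    have hR : ∀ i ∈ (PySem.List.pyRange char_pos (cs.length : Int) 1).filter (pvPred cs),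
        ¬ i < char_pos := by
      intro i hi
      have := (List.mem_filter.mp hi).1
      exact not_lt.mpr (PySem.List.mem_pyRange_one.mp this).1
    have hcast : ((char_pos.toNat : Nat) : Int) = char_pos := Int.toNat_of_nonneg h0
    have hfold := pvWalkLeft_eq cs char_pos.toNat
    rw [hcast] at hfold
    have hright := pvWalkRight_eq cs char_pos.toNat (by omega)
    rw [hcast] at hright
    -- reduce B's side
    have : ((PySem.List.pyRange 0 (cs.length : Int) 1).filter (fun i => pvIsBnd (PySem.List.pyGetD cs i ' ')))
        = (PySem.List.pyRange 0 char_pos 1).filter (pvPred cs)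
          ++ (PySem.List.pyRange char_pos (cs.length : Int) 1).filter (pvPred cs) := by
      rw [hsplit, List.filter_append]; rfl
    rw [this, pvScan_left char_pos _ _ hL, pvScan_right char_pos _ hR]
    simp only [← hfold, ← hright, pvSkipWsI_eq]
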